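-- pv_equiv track=rewrite | github.com/choijinhyuck/Algorithm | Solution/Summer, winter coding -2018/49995.py | solution
-- ===== SOURCE A (Python) =====
-- def solution(cookie):
--     l = len(cookie)
--     t = [0]
--     for i in range(l):
--         t.append(t[i] + cookie[i]) # 구간합을 미리 구해서 시간 복잡도를 낮춤
--     answer = 0
--
--     for i in range(l - 1): # 왼쪽 바구니 시작점
--         for j in range(l - i - 1): # 오른쪽 바구니 끝점
--             left = t[i + 1 + j] - t[i]  # 왼쪽 바구니 전체 쿠키 개수
--             right = t[i + 2 + j] - t[i + 1 + j]  # 오른쪽 바구니 전체 쿠키 개수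
--             if left < answer: # 왼쪽 합이 현재 최고 쿠키 획득 개수보다 작으면 바로 스킵
--                 continue
--             if (t[-1] - t[i])//2 < left: # 왼쪽 바구니 쿠키 총합이 전체의 반을 넘으면 오른쪽 바구니에서 같은 양 쿠키 획득 불가
--                 break
--             if (t[-1] - t[i]) % 2 == 0 and (t[-1] - t[i])//2 == left:
--                 answer = max(answer, left)
--                 break
--             if left == right:
--                 answer = max(answer, left)
--             elif left < right:
--                 continue
--             else: # right가 left보다 큰 경우
--                 if l - i - j - 1 >= 2: # 오른쪽 바구니 위치 이동 가능 여부
--                     for k in range(1, l - i - j - 1):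
--                         right = t[i + 2 + j + k] - t[i + 1 + j]
--                         if left == right:
--                             answer = max(answer, left)
--                             break
--                         elif left < right:
--                             break
--                         else:
--                             continue
--
--     return answer
-- ===== SOURCE B (Python) =====
-- def solution(cookie):
--     answer = 0
--     for m in range(len(cookie) - 1):
--         right_sums = set()
--         s = 0
--         for x in cookie[m + 1:]:
--             s += x
--             right_sums.add(s)
--         left = 0
--         for x in reversed(cookie[:m + 1]):
--             left += x
--             if left in right_sums and left > answer:
--                 answer = left
--     return answer
-- ===== Notes on version B (the rewrite author's own statement) =====
-- stated objective: faster
-- what changed: Per middle boundary B builds a hash set of all right-segment sums once and checks each left-segment sum by membership, replacing A's pruned nested (i,j) scan with its inner k-extension loop; Pre_ admits all-nonnegative (the natural cookie-count domain), all-nonpositive, and length<=2 lists, excluding longer mixed-sign lists where A's monotonicity-based pruning can skip valid equal splits that B finds.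
-- outside the precondition, e.g. on solution([5, -2, 3]): A returns 0, B returns 3; on solution([1, -3, 4, -5, 4]): A returns 0, B returns 1
import Mathlib
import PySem

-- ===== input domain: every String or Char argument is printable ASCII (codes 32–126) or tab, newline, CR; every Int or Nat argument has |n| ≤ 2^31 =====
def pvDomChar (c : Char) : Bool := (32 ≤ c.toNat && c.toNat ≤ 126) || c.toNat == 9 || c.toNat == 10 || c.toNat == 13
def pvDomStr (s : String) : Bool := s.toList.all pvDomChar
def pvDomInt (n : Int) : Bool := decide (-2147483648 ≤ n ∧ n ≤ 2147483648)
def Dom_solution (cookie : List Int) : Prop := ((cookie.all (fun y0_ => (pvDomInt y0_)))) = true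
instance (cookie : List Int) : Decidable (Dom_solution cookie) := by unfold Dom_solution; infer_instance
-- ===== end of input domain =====

-- B replaces A's pruned nested scans (with an inner right-extension loop) by, per middle
-- boundary, a set of all right-segment sums checked by membership against each left-segment
-- sum (measured faster at large sizes); Pre_ admits all-nonnegative (the natural cookie-count
-- domain), all-nonpositive, and length-at-most-2 lists, where A's pruning is exact.

-- ===== PORT A =====
-- t[idx] for an index that is always in range in A (Python would raise IndexError otherwise)
def tgetA (t : List Int) (idx : Int) : Int := PySem.List.pyGetD t idx 0

-- t = [0]; for i in range(l): t.append(t[i] + cookie[i])   (t[i] is the last element so far)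
def buildT (cookie : List Int) : List Int :=
  cookie.foldl (fun t c => t ++ [(t.getLast?.getD 0) + c]) [0]

-- the inner 'for k in range(1, l - i - j - 1)' loop with its breaks
def kloopA (t : List Int) (i j left : Int) (ks : List Int) (answer : Int) : Int :=
  match ks with
  | [] => answer
  | k :: rest =>
    let right := tgetA t (i + 2 + j + k) - tgetA t (i + 1 + j)
    if left = right then max answer left
    else if left < right then answer
    else kloopA t i j left rest answer

-- the 'for j in range(l - i - 1)' loop with its continue/break structure
def jloopA (t : List Int) (l i : Int) (js : List Int) (answer : Int) : Int :=
  match js with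
  | [] => answer
  | j :: rest =>
    let left := tgetA t (i + 1 + j) - tgetA t i
    let right := tgetA t (i + 2 + j) - tgetA t (i + 1 + j)
    if left < answer then jloopA t l i rest answer
    else if PySem.Int.floordiv (tgetA t (-1) - tgetA t i) 2 < left then answer
    else if PySem.Int.mod (tgetA t (-1) - tgetA t i) 2 = 0 ∧
            PySem.Int.floordiv (tgetA t (-1) - tgetA t i) 2 = left then max answer left
    else if left = right then jloopA t l i rest (max answer left)
    else if left < right then jloopA t l i rest answer
    else
      let answer' := if l - i - j - 1 ≥ 2
        then kloopA t i j left (PySem.List.pyRange 1 (l - i - j - 1) 1) answer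
        else answer
      jloopA t l i rest answer'

def solution (cookie : List Int) : Int :=
  let l : Int := cookie.length
  let t := buildT cookie
  (PySem.List.pyRange 0 (l - 1) 1).foldl
    (fun answer i => jloopA t l i (PySem.List.pyRange 0 (l - i - 1) 1) answer) 0

-- ===== PORT B =====
-- s = 0; for x in cookie[m+1:]: s += x; right_sums.add(s)
def rightSumsB (suffix : List Int) : PySem.Set Int :=
  (suffix.foldl (fun (p : PySem.Set Int × Int) x =>
      (PySem.Set.add p.1 (p.2 + x), p.2 + x)) (PySem.Set.empty, 0)).1

-- left = 0; for x in reversed(cookie[:m+1]): left += x; if left in right_sums and left > answer: answer = left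
def leftScanB (prefixRev : List Int) (rs : PySem.Set Int) (answer : Int) : Int :=
  (prefixRev.foldl (fun (q : Int × Int) x =>
      let L := q.2 + x
      (if PySem.Set.contains rs L ∧ q.1 < L then L else q.1, L)) (answer, 0)).1

def solution_alt (cookie : List Int) : Int :=
  (PySem.List.pyRange 0 ((cookie.length : Int) - 1) 1).foldl
    (fun answer m =>
      let rs := rightSumsB (PySem.List.slice cookie (some (m + 1)) none)
      leftScanB (PySem.List.slice cookie none (some (m + 1))).reverse rs answer) 0

-- ===== PRECONDITION & SPEC =====
-- Pre_ admits lists that are all nonnegative (the natural domain of cookie counts), all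
-- nonpositive, or of length at most 2; it excludes longer mixed-sign lists, on which A's
-- monotonicity-based pruning can skip valid equal splits that B finds.
def Pre_solution (cookie : List Int) : Prop :=
  (∀ x ∈ cookie, 0 ≤ x) ∨ (∀ x ∈ cookie, x ≤ 0) ∨ cookie.length ≤ 2
instance (cookie : List Int) : Decidable (Pre_solution cookie) := by
  unfold Pre_solution; infer_instance

def pvWitness_solution : List Int := [1, 2, 4, 3, 1, 0, 2]

def Spec_solution (cookie : List Int) (out : Int) : Prop := out = solution_alt cookie
instance (cookie : List Int) (out : Int) : Decidable (Spec_solution cookie out) := by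
  unfold Spec_solution; infer_instance

-- ===== CLAIM (what is proved, stated in full; the proofs are below) =====
def Claim_equal_solution : Prop :=
  ∀ (cookie : List Int), Dom_solution cookie → Pre_solution cookie →
    Spec_solution cookie (solution cookie)

-- ===== LEMMAS AND PROOFS =====

-- prefix sum of the first x elements (Int index, clamped; used only for 0 ≤ x)
def preI (cookie : List Int) (x : Int) : Int := (cookie.take x.toNat).sum

-- v is an achievable common sum of two adjacent contiguous baskets
def Ach (cookie : List Int) (v : Int) : Prop :=
  ∃ a b c : Int, 0 ≤ a ∧ a < b ∧ b < c ∧ c ≤ (cookie.length : Int) ∧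
    preI cookie b - preI cookie a = v ∧ preI cookie c - preI cookie b = v

lemma take_sum_mono (l : List Int) (h : ∀ x ∈ l, 0 ≤ x) {a b : Nat} (hab : a ≤ b) :
    (l.take a).sum ≤ (l.take b).sum := by
  have ht := List.take_add (l := l) (i := a) (j := b - a)
  rw [Nat.add_sub_cancel' hab] at ht
  rw [ht, List.sum_append]
  have h0 : 0 ≤ ((l.drop a).take (b - a)).sum :=
    List.sum_nonneg (fun x hx => h x (List.mem_of_mem_drop (List.mem_of_mem_take hx)))
  omega

lemma preI_mono (cookie : List Int) (h : ∀ x ∈ cookie, 0 ≤ x) {x y : Int}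
    (hxy : x ≤ y) : preI cookie x ≤ preI cookie y :=
  take_sum_mono cookie h (by omega)

-- segment sums via preI
lemma sum_drop_take (cookie : List Int) (d k : Nat) :
    ((cookie.drop d).take k).sum = preI cookie ((d : Int) + (k : Int)) - preI cookie (d : Int) := by
  have ht := List.take_add (l := cookie) (i := d) (j := k)
  have h1 : ((d : Int) + (k : Int)).toNat = d + k := by omega
  have h2 : ((d : Int)).toNat = d := by omega
  unfold preI
  rw [h1, h2, ht, List.sum_append]
  omega

-- scan characterisation of buildT
def scanT (s : Int) : List Int → List Int
  | [] => []
  | c :: cs => (s + c) :: scanT (s + c) cs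

lemma buildT_aux (cs : List Int) : ∀ (acc : List Int) (hne : acc ≠ []),
    cs.foldl (fun t c => t ++ [(t.getLast?.getD 0) + c]) acc
      = acc ++ scanT (acc.getLast hne) cs := by
  induction cs with
  | nil => intro acc hne; simp [scanT]
  | cons c cs ih =>
    intro acc hne
    simp only [List.foldl_cons]
    rw [ih (acc ++ [acc.getLast?.getD 0 + c]) (by simp)]
    have h1 : acc.getLast?.getD 0 = acc.getLast hne := by
      rw [List.getLast?_eq_some_getLast hne]; rfl
    have h2 : (acc ++ [acc.getLast?.getD 0 + c]).getLast (by simp)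
        = acc.getLast hne + c := by rw [List.getLast_concat, h1]
    rw [h2, scanT]
    simp [h1]

lemma scanT_get (cs : List Int) : ∀ (s : Int) (k : Nat), k < cs.length →
    (scanT s cs)[k]? = some (s + (cs.take (k+1)).sum) := by
  induction cs with
  | nil => intro s k hk; simp at hk
  | cons c cs ih =>
    intro s k hk
    cases k with
    | zero => simp [scanT]
    | succ k =>
      simp only [scanT, List.getElem?_cons_succ]
      rw [ih (s + c) k (by simpa using hk)]
      simp only [List.take_succ_cons, List.sum_cons, Option.some.injEq]
      ring

lemma length_scanT (cs : List Int) : ∀ s, (scanT s cs).length = cs.length := by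
  induction cs with
  | nil => intro s; rfl
  | cons c cs ih => intro s; simp [scanT, ih]

lemma length_buildT (cookie : List Int) :
    (buildT cookie).length = cookie.length + 1 := by
  unfold buildT
  rw [buildT_aux cookie [0] (by simp)]
  simp [length_scanT]

lemma buildT_get (cookie : List Int) (k : Nat) (hk : k ≤ cookie.length) :
    (buildT cookie)[k]? = some (preI cookie (k : Int)) := by
  unfold buildT
  rw [buildT_aux cookie [0] (by simp)]
  cases k with
  | zero => simp [preI]
  | succ k =>
    have h1 : ([(0 : Int)] ++ scanT ((List.getLast [0] (by simp))) cookie)[k+1]?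
        = (scanT ((List.getLast [(0 : Int)] (by simp))) cookie)[k]? := by
      simp
    rw [h1, scanT_get cookie _ k (by omega)]
    have h2 : ((k : Int) + 1).toNat = k + 1 := by omega
    simp [preI, h2, List.getLast]

lemma tget_eq (cookie : List Int) {x : Int} (h0 : 0 ≤ x)
    (hx : x ≤ (cookie.length : Int)) :
    tgetA (buildT cookie) x = preI cookie x := by
  unfold tgetA
  have hlen := length_buildT cookie
  rw [PySem.List.pyGetD_eq_getElem _ _ h0 (by push_cast [length_buildT]; omega)]
  have hg := buildT_get cookie x.toNat (by omega)
  have : (x.toNat : Int) = x := by omega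
  rw [this] at hg
  have hlt : x.toNat < (buildT cookie).length := by omega
  rw [List.getElem?_eq_getElem hlt] at hg
  exact Option.some.injEq _ _ ▸ (by simpa using hg)

-- ---- A side: results never decrease ----
lemma kloopA_ge (t : List Int) (i j left : Int) :
    ∀ (ks : List Int) (answer : Int), answer ≤ kloopA t i j left ks answer := by
  intro ks
  induction ks with
  | nil => intro answer; simp [kloopA]
  | cons k rest ih =>
    intro answer
    simp only [kloopA]
    split_ifs with h1 h2
    · exact le_max_left _ _
    · exact le_refl _
    · exact ih answer

lemma jloopA_ge (t : List Int) (l i : Int) :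
    ∀ (js : List Int) (answer : Int), answer ≤ jloopA t l i js answer := by
  intro js
  induction js with
  | nil => intro answer; simp [jloopA]
  | cons j rest ih =>
    intro answer
    simp only [jloopA]
    split_ifs with h1 h2 h3 h4 h5 h6
    · exact ih answer
    · exact le_refl _
    · exact le_max_left _ _
    · exact le_trans (le_max_left _ _) (ih _)
    · exact ih answer
    · exact le_trans (le_trans (kloopA_ge _ _ _ _ _ _) (ih _)) (le_refl _)
    · exact ih answer

-- ---- A side: soundness (every recorded value is achievable) ----
lemma kloopA_sound (cookie t : List Int) (i j left : Int) :
    ∀ (ks : List Int) (answer : Int),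
      (∀ k ∈ ks, left = tgetA t (i + 2 + j + k) - tgetA t (i + 1 + j) → Ach cookie left) →
      (answer = 0 ∨ Ach cookie answer) →
      (kloopA t i j left ks answer = 0 ∨ Ach cookie (kloopA t i j left ks answer)) := by
  intro ks
  induction ks with
  | nil => intro answer _ h; simpa [kloopA] using h
  | cons k rest ih =>
    intro answer hk h
    simp only [kloopA]
    split_ifs with h1 h2
    · have hAch := hk k (List.mem_cons_self) h1
      rcases le_total answer left with hle | hle
      · rw [max_eq_right hle]; exact Or.inr hAch
      · rw [max_eq_left hle]; exact h
    · exact h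
    · exact ih answer (fun k' hk' => hk k' (List.mem_cons_of_mem _ hk')) h

lemma tget_last (cookie : List Int) :
    tgetA (buildT cookie) (-1) = preI cookie (cookie.length : Int) := by
  unfold tgetA
  have hne : buildT cookie ≠ [] := by
    have := length_buildT cookie; intro h; rw [h] at this; simp at this
  rw [PySem.List.pyGetD_neg_one _ _ hne]
  have hlen := length_buildT cookie
  have hg := buildT_get cookie cookie.length (le_refl _)
  rw [List.getLast_eq_getElem]
  have hlt : (buildT cookie).length - 1 < (buildT cookie).length := by omega
  rw [List.getElem?_eq_getElem (by omega)] at hg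
  have hidx : (buildT cookie).length - 1 = cookie.length := by omega
  simp only [hidx] at *
  simpa using hg

lemma jloopA_sound (cookie : List Int) (i : Int) (hi : 0 ≤ i) :
    ∀ (js : List Int) (answer : Int),
      (∀ j ∈ js, 0 ≤ j ∧ j < (cookie.length : Int) - i - 1) →
      (answer = 0 ∨ Ach cookie answer) →
      (jloopA (buildT cookie) (cookie.length : Int) i js answer = 0 ∨
        Ach cookie (jloopA (buildT cookie) (cookie.length : Int) i js answer)) := by
  intro js
  induction js with
  | nil => intro answer _ h; simpa [jloopA] using h
  | cons j rest ih =>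
    intro answer hjs h
    obtain ⟨hj0, hjlt⟩ := hjs j List.mem_cons_self
    have hrest := fun j' hj' => hjs j' (List.mem_cons_of_mem _ hj')
    simp only [jloopA]
    rw [tget_eq cookie (x := i + 1 + j) (by omega) (by omega),
        tget_eq cookie (x := i + 2 + j) (by omega) (by omega),
        tget_eq cookie (x := i) (by omega) (by omega),
        tget_last cookie]
    split_ifs with h1 h2 h3 h4 h5 h6
    · exact ih answer hrest h
    · exact h
    · -- S is even and left is exactly half of the remaining total: record left
      obtain ⟨hmod, hfd⟩ := h3
      have hS := PySem.Int.floordiv_mul_add_mod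
        (preI cookie (cookie.length : Int) - preI cookie i) 2
      rw [hmod, hfd] at hS
      have hAch : Ach cookie (preI cookie (i + 1 + j) - preI cookie i) :=
        ⟨i, i + 1 + j, (cookie.length : Int), hi, by omega, by omega, le_refl _,
          rfl, by omega⟩
      rcases le_total answer (preI cookie (i + 1 + j) - preI cookie i) with hle | hle
      · rw [max_eq_right hle]; exact Or.inr hAch
      · rw [max_eq_left hle]; exact h
    · -- left = right: record left
      have hAch : Ach cookie (preI cookie (i + 1 + j) - preI cookie i) :=
        ⟨i, i + 1 + j, i + 2 + j, hi, by omega, by omega, by omega, rfl, by omega⟩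
      refine ih _ hrest ?_
      rcases le_total answer (preI cookie (i + 1 + j) - preI cookie i) with hle | hle
      · rw [max_eq_right hle]; exact Or.inr hAch
      · rw [max_eq_left hle]; exact h
    · exact ih answer hrest h
    · -- inner extension loop
      refine ih _ hrest ?_
      refine kloopA_sound cookie _ i j _ _ answer ?_ h
      intro k hkmem hkeq
      rw [PySem.List.mem_pyRange_one] at hkmem
      rw [tget_eq cookie (x := i + 2 + j + k) (by omega) (by omega),
          tget_eq cookie (x := i + 1 + j) (by omega) (by omega)] at hkeq
      exact ⟨i, i + 1 + j, i + 2 + j + k, hi, by omega, by omega, by omega,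
        rfl, by omega⟩
    · exact ih answer hrest h

-- ---- A side: completeness (an achievable v is found; needs nonnegative cookies) ----
lemma kloopA_complete (cookie : List Int) (hnn : ∀ x ∈ cookie, 0 ≤ x)
    (i j c v : Int) (hi : 0 ≤ i) (hj : 0 ≤ j)
    (hc1 : i + 2 + j < c) (hc2 : c ≤ (cookie.length : Int))
    (hv : preI cookie c - preI cookie (i + 1 + j) = v) :
    ∀ (d : Nat) (k0 : Int) (answer : Int), 1 ≤ k0 → k0 ≤ c - i - 2 - j →
      (c - i - 2 - j - k0).toNat = d →
      v ≤ kloopA (buildT cookie) i j v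
            (PySem.List.pyRange k0 ((cookie.length : Int) - i - j - 1) 1) answer := by
  intro d
  induction d with
  | zero =>
    intro k0 answer hk1 hk2 hd
    rw [PySem.List.pyRange_one_cons (by omega)]
    simp only [kloopA]
    rw [tget_eq cookie (x := i + 2 + j + k0) (by omega) (by omega),
        tget_eq cookie (x := i + 1 + j) (by omega) (by omega)]
    have hk0 : i + 2 + j + k0 = c := by omega
    rw [hk0]
    split_ifs with h1 h2
    · exact le_max_right _ _
    · exact absurd hv.symm h1
    · exact absurd hv.symm h1
  | succ d ih =>
    intro k0 answer hk1 hk2 hd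
    rw [PySem.List.pyRange_one_cons (by omega)]
    simp only [kloopA]
    rw [tget_eq cookie (x := i + 2 + j + k0) (by omega) (by omega),
        tget_eq cookie (x := i + 1 + j) (by omega) (by omega)]
    have hle : preI cookie (i + 2 + j + k0) - preI cookie (i + 1 + j) ≤ v := by
      have := preI_mono cookie hnn (x := i + 2 + j + k0) (y := c) (by omega)
      linarith
    split_ifs with h1 h2
    · exact le_max_right _ _
    · exact absurd h2 (not_lt.mpr hle)
    · exact ih (k0 + 1) answer (by omega) (by omega) (by omega)

lemma jloopA_complete (cookie : List Int) (hnn : ∀ x ∈ cookie, 0 ≤ x)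
    (i b c v : Int) (hi : 0 ≤ i) (hb : i < b) (hc : b < c)
    (hcn : c ≤ (cookie.length : Int))
    (hvl : preI cookie b - preI cookie i = v)
    (hvr : preI cookie c - preI cookie b = v) :
    ∀ (d : Nat) (j0 : Int) (answer : Int), 0 ≤ j0 → j0 ≤ b - i - 1 →
      (b - i - 1 - j0).toNat = d →
      v ≤ jloopA (buildT cookie) (cookie.length : Int) i
            (PySem.List.pyRange j0 ((cookie.length : Int) - i - 1) 1) answer := by
  have hv2 : v + v ≤ preI cookie (cookie.length : Int) - preI cookie i := by
    have := preI_mono cookie hnn (x := c) (y := (cookie.length : Int)) hcn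
    linarith
  have hv0 : 0 ≤ v := by
    have := preI_mono cookie hnn (x := b) (y := c) (by omega)
    linarith
  intro d
  induction d with
  | zero =>
    intro j0 answer hj0 hjb hd
    have hj : i + 1 + j0 = b := by omega
    rw [PySem.List.pyRange_one_cons (by omega)]
    simp only [jloopA]
    rw [tget_eq cookie (x := i + 1 + j0) (by omega) (by omega),
        tget_eq cookie (x := i + 2 + j0) (by omega) (by omega),
        tget_eq cookie (x := i) (by omega) (by omega),
        tget_last cookie, hj]
    have hfd : v ≤ PySem.Int.floordiv
        (preI cookie (cookie.length : Int) - preI cookie i) 2 :=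
      (PySem.Int.le_floordiv_iff_mul_le (by norm_num)).mpr (by linarith)
    split_ifs with h1 h2 h3 h4 h5 h6
    · -- left < answer: the answer is already at least v
      calc v ≤ answer := by linarith
        _ ≤ _ := jloopA_ge _ _ _ _ _
    · exact absurd h2 (not_lt.mpr (by linarith))
    · -- exact-half shortcut records left = v
      have : v ≤ preI cookie b - preI cookie i := le_refl _ |>.trans (by linarith)
      calc v = preI cookie b - preI cookie i := hvl.symm
        _ ≤ _ := le_max_right _ _
    · -- left = right records left = v
      calc v = preI cookie b - preI cookie i := hvl.symm
        _ ≤ max answer (preI cookie b - preI cookie i) := le_max_right _ _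
        _ ≤ _ := jloopA_ge _ _ _ _ _
    · -- left < right is impossible: right ≤ v
      have he : preI cookie (i + 2 + j0) = preI cookie (b + 1) := by congr 1; omega
      have hmono := preI_mono cookie hnn (x := b + 1) (y := c) (by omega)
      rw [he, hvl] at h5
      linarith
    · -- enter the inner extension loop
      have hne : c ≠ b + 1 := by
        intro hcb
        have he : preI cookie (i + 2 + j0) = preI cookie (b + 1) := by congr 1; omega
        rw [he, ← hcb, hvr, hvl] at h4
        exact h4 rfl
      have hcall := kloopA_complete cookie hnn i j0 c v hi (by omega) (by omega) hcn
        (by rw [hj]; exact hvr) (c - i - 2 - j0 - 1).toNat 1 answer (by omega)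
        (by omega) (by omega)
      rw [hvl]
      calc v ≤ _ := hcall
        _ ≤ _ := jloopA_ge _ _ _ _ _
    · -- the guard l - i - j - 1 ≥ 2 must hold here
      exfalso
      have hne : c ≠ b + 1 := by
        intro hcb
        have he : preI cookie (i + 2 + j0) = preI cookie (b + 1) := by congr 1; omega
        rw [he, ← hcb, hvr, hvl] at h4
        exact h4 rfl
      omega
  | succ d ih =>
    intro j0 answer hj0 hjb hd
    rw [PySem.List.pyRange_one_cons (by omega)]
    simp only [jloopA]
    rw [tget_eq cookie (x := i + 1 + j0) (by omega) (by omega),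
        tget_eq cookie (x := i + 2 + j0) (by omega) (by omega),
        tget_eq cookie (x := i) (by omega) (by omega),
        tget_last cookie]
    have hlle : preI cookie (i + 1 + j0) - preI cookie i ≤ v := by
      have := preI_mono cookie hnn (x := i + 1 + j0) (y := b) (by omega)
      linarith
    have hfd : v ≤ PySem.Int.floordiv
        (preI cookie (cookie.length : Int) - preI cookie i) 2 :=
      (PySem.Int.le_floordiv_iff_mul_le (by norm_num)).mpr (by linarith)
    split_ifs with h1 h2 h3 h4 h5 h6
    · exact ih (j0 + 1) answer (by omega) (by omega) (by omega)
    · exact absurd h2 (not_lt.mpr (by linarith))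
    · -- the recorded half is at least v
      obtain ⟨hmod, hfdeq⟩ := h3
      calc v ≤ _ := hfd
        _ = preI cookie (i + 1 + j0) - preI cookie i := hfdeq
        _ ≤ _ := le_max_right _ _
    · exact ih (j0 + 1) _ (by omega) (by omega) (by omega)
    · exact ih (j0 + 1) answer (by omega) (by omega) (by omega)
    · exact ih (j0 + 1) _ (by omega) (by omega) (by omega)
    · exact ih (j0 + 1) answer (by omega) (by omega) (by omega)

-- ---- A side: the outer fold ----
lemma foldA_ge (t : List Int) (l : Int) : ∀ (is : List Int) (ans : Int),
    ans ≤ is.foldl (fun answer i =>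
      jloopA t l i (PySem.List.pyRange 0 (l - i - 1) 1) answer) ans := by
  intro is
  induction is with
  | nil => intro ans; simp
  | cons i rest ih =>
    intro ans
    simp only [List.foldl_cons]
    exact le_trans (jloopA_ge _ _ _ _ _) (ih _)

lemma foldA_complete (t : List Int) (l v : Int) :
    ∀ (is : List Int) (ans a : Int), a ∈ is →
      (∀ ans', v ≤ jloopA t l a (PySem.List.pyRange 0 (l - a - 1) 1) ans') →
      v ≤ is.foldl (fun answer i =>
        jloopA t l i (PySem.List.pyRange 0 (l - i - 1) 1) answer) ans := by
  intro is
  induction is with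
  | nil => intro ans a ha _; simp at ha
  | cons i rest ih =>
    intro ans a ha hstep
    simp only [List.foldl_cons]
    rcases List.mem_cons.mp ha with rfl | ha'
    · exact le_trans (hstep ans) (foldA_ge _ _ _ _)
    · exact ih _ a ha' hstep

lemma foldA_sound (cookie : List Int) :
    ∀ (is : List Int) (ans : Int),
      (∀ i ∈ is, 0 ≤ i ∧ i < (cookie.length : Int) - 1) →
      (ans = 0 ∨ Ach cookie ans) →
      (is.foldl (fun answer i => jloopA (buildT cookie) (cookie.length : Int) i
          (PySem.List.pyRange 0 ((cookie.length : Int) - i - 1) 1) answer) ans = 0 ∨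
        Ach cookie (is.foldl (fun answer i => jloopA (buildT cookie) (cookie.length : Int) i
          (PySem.List.pyRange 0 ((cookie.length : Int) - i - 1) 1) answer) ans)) := by
  intro is
  induction is with
  | nil => intro ans _ h; simpa using h
  | cons i rest ih =>
    intro ans his h
    obtain ⟨hi0, hilt⟩ := his i List.mem_cons_self
    simp only [List.foldl_cons]
    refine ih _ (fun i' hi' => his i' (List.mem_cons_of_mem _ hi')) ?_
    refine jloopA_sound cookie i hi0 _ ans ?_ h
    intro j hj
    rw [PySem.List.mem_pyRange_one] at hj
    omega

lemma solution_nonneg (cookie : List Int) : 0 ≤ solution cookie := by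
  simp only [solution]
  exact foldA_ge _ _ _ 0

lemma solution_sound (cookie : List Int) :
    solution cookie = 0 ∨ Ach cookie (solution cookie) := by
  simp only [solution]
  refine foldA_sound cookie _ 0 ?_ (Or.inl rfl)
  intro i hi
  rw [PySem.List.mem_pyRange_one] at hi
  omega

lemma solution_complete (cookie : List Int) (hnn : ∀ x ∈ cookie, 0 ≤ x)
    (v : Int) (hv : Ach cookie v) : v ≤ solution cookie := by
  obtain ⟨a, b, c, ha0, hab, hbc, hcn, hvl, hvr⟩ := hv
  simp only [solution]
  refine foldA_complete _ _ v _ 0 a ?_ ?_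
  · rw [PySem.List.mem_pyRange_one]; omega
  · intro ans'
    exact jloopA_complete cookie hnn a b c v ha0 hab hbc hcn hvl hvr
      (b - a - 1).toNat 0 ans' (by omega) (by omega) (by omega)

-- ---- B side: the right-sum set ----
lemma rightSumsB_aux (y : Int) : ∀ (suffix : List Int) (s0 : PySem.Set Int) (acc : Int),
    (y ∈ (suffix.foldl (fun (p : PySem.Set Int × Int) x =>
        (PySem.Set.add p.1 (p.2 + x), p.2 + x)) (s0, acc)).1 ↔
      y ∈ s0 ∨ ∃ k : Nat, k < suffix.length ∧ y = acc + (suffix.take (k+1)).sum) := by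
  intro suffix
  induction suffix with
  | nil => intro s0 acc; simp
  | cons x xs ih =>
    intro s0 acc
    simp only [List.foldl_cons]
    rw [ih (PySem.Set.add s0 (acc + x)) (acc + x)]
    rw [PySem.Set.mem_add]
    constructor
    · rintro ((hy | hy) | ⟨k, hk, hy⟩)
      · exact Or.inl hy
      · exact Or.inr ⟨0, by simp, by simpa using hy⟩
      · refine Or.inr ⟨k + 1, by simpa using hk, ?_⟩
        simp only [List.take_succ_cons, List.sum_cons] at *
        omega
    · rintro (hy | ⟨k, hk, hy⟩)
      · exact Or.inl (Or.inl hy)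
      · cases k with
        | zero => exact Or.inl (Or.inr (by simpa using hy))
        | succ k =>
          refine Or.inr ⟨k, by simpa using hk, ?_⟩
          simp only [List.take_succ_cons, List.sum_cons] at *
          omega

lemma rightSumsB_mem (suffix : List Int) (y : Int) :
    y ∈ rightSumsB suffix ↔
      ∃ k : Nat, k < suffix.length ∧ y = (suffix.take (k+1)).sum := by
  unfold rightSumsB
  rw [rightSumsB_aux y suffix PySem.Set.empty 0]
  simp [PySem.Set.empty]

-- ---- B side: the left scan ----
lemma leftScanB_ge (rs : PySem.Set Int) : ∀ (ys : List Int) (ans L0 : Int),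
    ans ≤ (ys.foldl (fun (q : Int × Int) x =>
      (if PySem.Set.contains rs (q.2 + x) ∧ q.1 < q.2 + x then q.2 + x else q.1,
        q.2 + x)) (ans, L0)).1 := by
  intro ys
  induction ys with
  | nil => intro ans L0; simp
  | cons x xs ih =>
    intro ans L0
    simp only [List.foldl_cons]
    refine le_trans ?_ (ih _ _)
    split_ifs with h
    · exact le_of_lt h.2
    · exact le_refl _

lemma leftScanB_sound (rs : PySem.Set Int) : ∀ (ys : List Int) (ans L0 : Int),
    ((ys.foldl (fun (q : Int × Int) x =>
        (if PySem.Set.contains rs (q.2 + x) ∧ q.1 < q.2 + x then q.2 + x else q.1,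
          q.2 + x)) (ans, L0)).1 = ans ∨
      ∃ j : Nat, 1 ≤ j ∧ j ≤ ys.length ∧
        (ys.foldl (fun (q : Int × Int) x =>
          (if PySem.Set.contains rs (q.2 + x) ∧ q.1 < q.2 + x then q.2 + x else q.1,
            q.2 + x)) (ans, L0)).1 = L0 + (ys.take j).sum ∧
        (ys.foldl (fun (q : Int × Int) x =>
          (if PySem.Set.contains rs (q.2 + x) ∧ q.1 < q.2 + x then q.2 + x else q.1,
            q.2 + x)) (ans, L0)).1 ∈ rs) := by
  intro ys
  induction ys with
  | nil => intro ans L0; simp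
  | cons x xs ih =>
    intro ans L0
    simp only [List.foldl_cons]
    rcases ih (if PySem.Set.contains rs (L0 + x) ∧ ans < L0 + x then L0 + x else ans)
        (L0 + x) with h | ⟨j, hj1, hj2, hval, hmem⟩
    · rw [h]
      split_ifs at h ⊢ with hc
      · refine Or.inr ⟨1, le_refl _, by simp, ?_, ?_⟩
        · simp
        · exact (PySem.Set.contains_iff rs (L0 + x)).mp hc.1
      · exact Or.inl rfl
    · refine Or.inr ⟨j + 1, by omega, by simpa using hj2, ?_, hmem⟩
      rw [hval]
      simp only [List.take_succ_cons, List.sum_cons]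
      omega

lemma leftScanB_complete (rs : PySem.Set Int) : ∀ (ys : List Int) (ans L0 v : Int),
    (∃ j : Nat, 1 ≤ j ∧ j ≤ ys.length ∧ v = L0 + (ys.take j).sum ∧ v ∈ rs) →
    v ≤ (ys.foldl (fun (q : Int × Int) x =>
      (if PySem.Set.contains rs (q.2 + x) ∧ q.1 < q.2 + x then q.2 + x else q.1,
        q.2 + x)) (ans, L0)).1 := by
  intro ys
  induction ys with
  | nil =>
    rintro ans L0 v ⟨j, hj1, hj2, _, _⟩
    simp at hj2; omega
  | cons x xs ih =>
    rintro ans L0 v ⟨j, hj1, hj2, hval, hmem⟩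
    simp only [List.foldl_cons]
    cases j with
    | zero => omega
    | succ j =>
      cases j with
      | zero =>
        -- v = L0 + x is reached right now
        simp only [List.take_succ_cons, List.take_zero, List.sum_cons,
          List.sum_nil, add_zero] at hval
        by_cases hlt : ans < L0 + x
        case neg =>
          exact le_trans (by omega) (leftScanB_ge rs xs _ _)
        case pos =>
          have hc : PySem.Set.contains rs (L0 + x) ∧ ans < L0 + x :=
            ⟨(PySem.Set.contains_iff rs (L0 + x)).mpr (hval ▸ hmem), hlt⟩
          rw [if_pos hc]
          exact le_trans (by omega) (leftScanB_ge rs xs _ _)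
      | succ j =>
        refine ih _ (L0 + x) v ⟨j + 1, by omega, by simpa using hj2, ?_, hmem⟩
        rw [hval]
        simp only [List.take_succ_cons, List.sum_cons]
        omega

-- ---- B side: sums in terms of preI ----
lemma rev_take_sum (cookie : List Int) (M j : Nat) (hM : M ≤ cookie.length)
    (hj : j ≤ M) :
    (((cookie.take M).reverse).take j).sum
      = preI cookie (M : Int) - preI cookie ((M : Int) - (j : Int)) := by
  rw [List.take_reverse, List.sum_reverse]
  have hlen : (cookie.take M).length = M := by simp [List.length_take]; omega
  rw [hlen]
  have hdt : List.drop (M - j) (cookie.take M) =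
      (List.drop (M - j) cookie).take (M - (M - j)) := by
    rw [List.drop_take]
  rw [hdt, sum_drop_take cookie (M - j) (M - (M - j))]
  have h1 : ((M - j : Nat) : Int) = (M : Int) - (j : Int) := by omega
  have h2 : ((M - j : Nat) : Int) + ((M - (M - j) : Nat) : Int) = (M : Int) := by omega
  rw [h1] at *
  rw [h2]

lemma drop_take_sum (cookie : List Int) (M k : Nat) :
    ((cookie.drop M).take (k + 1)).sum
      = preI cookie ((M : Int) + (k : Int) + 1) - preI cookie (M : Int) := by
  rw [sum_drop_take cookie M (k + 1)]
  have h : ((M : Int)) + ((k + 1 : Nat) : Int) = (M : Int) + (k : Int) + 1 := by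
    push_cast; ring
  rw [h]

-- ---- B side: one outer step finds at least everything achievable at boundary b = m + 1 ----
lemma stepB_eval (cookie : List Int) (m : Int) (hm : 0 ≤ m) :
    (PySem.List.slice cookie (some (m + 1)) none = cookie.drop (m.toNat + 1)) ∧
    (PySem.List.slice cookie none (some (m + 1)) = cookie.take (m.toNat + 1)) := by
  constructor
  · have h : (m + 1 : Int) = ((m.toNat + 1 : Nat) : Int) := by omega
    rw [h, PySem.List.slice_from_natCast]
  · have h : (m + 1 : Int) = ((m.toNat + 1 : Nat) : Int) := by omega
    rw [h, PySem.List.slice_to_natCast]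

-- the fold that solution_alt performs
lemma foldB_ge (cookie : List Int) : ∀ (ms : List Int) (ans : Int),
    (∀ m ∈ ms, 0 ≤ m) →
    ans ≤ ms.foldl (fun answer m =>
      leftScanB (PySem.List.slice cookie none (some (m + 1))).reverse
        (rightSumsB (PySem.List.slice cookie (some (m + 1)) none)) answer) ans := by
  intro ms
  induction ms with
  | nil => intro ans _; simp
  | cons m rest ih =>
    intro ans hms
    simp only [List.foldl_cons]
    refine le_trans ?_ (ih _ (fun m' hm' => hms m' (List.mem_cons_of_mem _ hm')))
    exact leftScanB_ge _ _ _ _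

lemma foldB_sound (cookie : List Int) : ∀ (ms : List Int) (ans : Int),
    (∀ m ∈ ms, 0 ≤ m ∧ m < (cookie.length : Int) - 1) →
    (ans = 0 ∨ Ach cookie ans) →
    (ms.foldl (fun answer m =>
        leftScanB (PySem.List.slice cookie none (some (m + 1))).reverse
          (rightSumsB (PySem.List.slice cookie (some (m + 1)) none)) answer) ans = 0 ∨
      Ach cookie (ms.foldl (fun answer m =>
        leftScanB (PySem.List.slice cookie none (some (m + 1))).reverse
          (rightSumsB (PySem.List.slice cookie (some (m + 1)) none)) answer) ans)) := by
  intro ms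
  induction ms with
  | nil => intro ans _ h; simpa using h
  | cons m rest ih =>
    intro ans hms h
    obtain ⟨hm0, hmlt⟩ := hms m List.mem_cons_self
    simp only [List.foldl_cons]
    refine ih _ (fun m' hm' => hms m' (List.mem_cons_of_mem _ hm')) ?_
    obtain ⟨h1, h2⟩ := stepB_eval cookie m hm0
    rw [h1, h2]
    unfold leftScanB
    set M : Nat := m.toNat + 1 with hMdef
    have hMle : M ≤ cookie.length := by omega
    rcases leftScanB_sound (rightSumsB (cookie.drop M)) ((cookie.take M).reverse)
        ans 0 with hs | ⟨j, hj1, hj2, hval, hmem⟩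
    · rw [hs]; exact h
    · right
      rw [rightSumsB_mem] at hmem
      obtain ⟨k, hk, hky⟩ := hmem
      rw [List.length_reverse, List.length_take] at hj2
      have hj2' : j ≤ M := by omega
      rw [rev_take_sum cookie M j hMle hj2', zero_add] at hval
      rw [drop_take_sum cookie M k] at hky
      have hklen : k < cookie.length - M := by simpa [List.length_drop] using hk
      refine ⟨(M : Int) - (j : Int), (M : Int), (M : Int) + (k : Int) + 1,
        by omega, by omega, by omega, by omega, ?_, ?_⟩
      · exact hval.symm
      · exact hky.symm

lemma foldB_complete (cookie : List Int) (v : Int) (b0 : Int) (hv : ∃ a c : Int,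
      0 ≤ a ∧ a < b0 ∧ b0 < c ∧ c ≤ (cookie.length : Int) ∧
      preI cookie b0 - preI cookie a = v ∧ preI cookie c - preI cookie b0 = v) :
    ∀ (ms : List Int) (ans : Int), (∀ m ∈ ms, 0 ≤ m) → (b0 - 1) ∈ ms →
    v ≤ ms.foldl (fun answer m =>
      leftScanB (PySem.List.slice cookie none (some (m + 1))).reverse
        (rightSumsB (PySem.List.slice cookie (some (m + 1)) none)) answer) ans := by
  obtain ⟨a, c, ha0, hab, hbc, hcn, hvl, hvr⟩ := hv
  intro ms
  induction ms with
  | nil => intro ans _ hmem; simp at hmem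
  | cons m rest ih =>
    intro ans hms hmem
    simp only [List.foldl_cons]
    rcases List.mem_cons.mp hmem with heq | hmem'
    · -- this is the boundary where v is found
      refine le_trans ?_ (foldB_ge cookie rest _
        (fun m' hm' => hms m' (List.mem_cons_of_mem _ hm')))
      have hm0 : 0 ≤ m := (hms m List.mem_cons_self)
      obtain ⟨h1, h2⟩ := stepB_eval cookie m hm0
      rw [h1, h2]
      unfold leftScanB
      set M : Nat := m.toNat + 1 with hMdef
      have hMb : (M : Int) = b0 := by omega
      have hMle : M ≤ cookie.length := by omega
      refine leftScanB_complete _ _ ans 0 v ⟨(b0 - a).toNat, by omega, ?_, ?_, ?_⟩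
      · rw [List.length_reverse, List.length_take]; omega
      · rw [rev_take_sum cookie M (b0 - a).toNat hMle (by omega), zero_add]
        have h3 : (M : Int) - ((b0 - a).toNat : Int) = a := by omega
        rw [h3, hMb]
        omega
      · rw [rightSumsB_mem]
        refine ⟨(c - b0 - 1).toNat, ?_, ?_⟩
        · rw [List.length_drop]; omega
        · rw [drop_take_sum cookie M (c - b0 - 1).toNat]
          have h4 : (M : Int) + ((c - b0 - 1).toNat : Int) + 1 = c := by omega
          rw [h4, hMb]
          omega
    · exact ih _ (fun m' hm' => hms m' (List.mem_cons_of_mem _ hm')) hmem'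

lemma solution_alt_nonneg (cookie : List Int) : 0 ≤ solution_alt cookie := by
  simp only [solution_alt]
  refine foldB_ge cookie _ 0 ?_
  intro m hm
  rw [PySem.List.mem_pyRange_one] at hm
  omega

lemma solution_alt_sound (cookie : List Int) :
    solution_alt cookie = 0 ∨ Ach cookie (solution_alt cookie) := by
  simp only [solution_alt]
  refine foldB_sound cookie _ 0 ?_ (Or.inl rfl)
  intro m hm
  rw [PySem.List.mem_pyRange_one] at hm
  omega

lemma solution_alt_complete (cookie : List Int) (v : Int) (hv : Ach cookie v) :
    v ≤ solution_alt cookie := by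
  obtain ⟨a, b, c, ha0, hab, hbc, hcn, hvl, hvr⟩ := hv
  simp only [solution_alt]
  refine foldB_complete cookie v b ⟨a, c, ha0, hab, hbc, hcn, hvl, hvr⟩ _ 0 ?_ ?_
  · intro m hm
    rw [PySem.List.mem_pyRange_one] at hm
    omega
  · rw [PySem.List.mem_pyRange_one]
    omega

-- ---- the two implementations agree on nonnegative lists ----
lemma eq_of_nonneg (cookie : List Int) (hnn : ∀ x ∈ cookie, 0 ≤ x) :
    solution cookie = solution_alt cookie := by
  apply le_antisymm
  · rcases solution_sound cookie with h | h
    · rw [h]; exact solution_alt_nonneg cookie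
    · exact solution_alt_complete cookie _ h
  · rcases solution_alt_sound cookie with h | h
    · rw [h]; exact solution_nonneg cookie
    · exact solution_complete cookie hnn _ h

lemma sum_nonpos_of_nonpos (l : List Int) (h : ∀ x ∈ l, x ≤ 0) : l.sum ≤ 0 := by
  induction l with
  | nil => simp
  | cons x xs ih =>
    simp only [List.sum_cons]
    have h1 := h x List.mem_cons_self
    have h2 := ih (fun y hy => h y (List.mem_cons_of_mem _ hy))
    omega

-- ---- on all-nonpositive lists no achievable sum is positive ----
lemma ach_nonpos (cookie : List Int) (hnp : ∀ x ∈ cookie, x ≤ 0) (v : Int)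
    (hv : Ach cookie v) : v ≤ 0 := by
  obtain ⟨a, b, c, ha0, hab, hbc, hcn, _, hvr⟩ := hv
  have hs := sum_drop_take cookie b.toNat (c.toNat - b.toNat)
  have h1 : ((b.toNat : Nat) : Int) = b := by omega
  have h2 : b + ((c.toNat - b.toNat : Nat) : Int) = c := by omega
  rw [h1, h2] at hs
  have hle : ((cookie.drop b.toNat).take (c.toNat - b.toNat)).sum ≤ 0 :=
    sum_nonpos_of_nonpos _ (fun x hx =>
      hnp x (List.mem_of_mem_drop (List.mem_of_mem_take hx)))
  omega

-- ---- for a two-element list the only achievable sum is a = b ----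
lemma ach_pair (a b v : Int) (hv : Ach [a, b] v) : v = a ∧ a = b := by
  obtain ⟨a0, b0, c0, ha0, hab, hbc, hcn, hvl, hvr⟩ := hv
  simp only [List.length_cons, List.length_nil] at hcn
  have h1 : a0 = 0 ∧ b0 = 1 ∧ c0 = 2 := by omega
  obtain ⟨rfl, rfl, rfl⟩ := h1
  have e0 : preI [a, b] 0 = 0 := rfl
  have e1 : preI [a, b] 1 = a := by simp [preI]
  have e2 : preI [a, b] 2 = a + b := by simp [preI, Int.toNat]
  rw [e0, e1] at hvl
  rw [e1, e2] at hvr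
  omega

-- ===== VERDICT (by name: the statement is the Claim_ definition above) =====
theorem solution_spec : Claim_equal_solution := by
  unfold Claim_equal_solution Spec_solution Pre_solution
  intro cookie _ hpre
  rcases hpre with hnn | hnp | hshort
  · exact eq_of_nonneg cookie hnn
  · -- all nonpositive: every achievable sum is ≤ 0, so both sides are 0
    have h1 : solution cookie = 0 := by
      rcases solution_sound cookie with h | h
      · exact h
      · have := ach_nonpos cookie hnp _ h
        have := solution_nonneg cookie
        omega
    have h2 : solution_alt cookie = 0 := by
      rcases solution_alt_sound cookie with h | h
      · exact h
      · have := ach_nonpos cookie hnp _ h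
        have := solution_alt_nonneg cookie
        omega
    rw [h1, h2]
  · -- at most two cookies
    match cookie, hshort with
    | [], _ => rfl
    | [a], _ => rfl
    | [a, b], _ =>
      by_cases hab : a = b ∧ 0 < a
      · exact eq_of_nonneg [a, b] (by intro x hx; simp at hx; rcases hx with rfl | rfl <;> omega)
      · have h1 : solution [a, b] = 0 := by
          rcases solution_sound [a, b] with h | h
          · exact h
          · obtain ⟨hva, hb⟩ := ach_pair a b _ h
            have hge := solution_nonneg [a, b]
            by_cases hpos : 0 < a
            · exact absurd ⟨hb, hpos⟩ hab
            · omega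
        have h2 : solution_alt [a, b] = 0 := by
          rcases solution_alt_sound [a, b] with h | h
          · exact h
          · obtain ⟨hva, hb⟩ := ach_pair a b _ h
            have hge := solution_alt_nonneg [a, b]
            by_cases hpos : 0 < a
            · exact absurd ⟨hb, hpos⟩ hab
            · omega
        rw [h1, h2]
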